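-- pv_equiv track=rewrite | github.com/lfglfg11/ORMStudentSystem | libs/db_table_api.py | get_max_value
-- ===== SOURCE A (Python) =====
-- def get_max_value(res):
--     max = 0
--     k = 0
--     for i in range(len(res)):
--         max = int(res[i][0])
--         for j in range(len(res)):
--             if max < int(res[j][0]):
--                 max = int(res[j][0])
--                 k = j
--
--     return (max, int(res[k][1]), k)
-- ===== SOURCE B (Python) =====
-- def get_max_value(res):
--     col = [int(row[0]) for row in res]
--     m = max(col)
--     k = col.index(m)
--     return (m, int(res[k][1]), k)
-- ===== Notes on version B (the rewrite author's own statement) =====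
-- stated objective: faster
-- what changed: replaced A's nested rescan (an O(n^2) pair of loops recomputing the column maximum n times) by three staged linear passes: extract column 0, take max() of it, then index() of that maximum
import Mathlib
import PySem

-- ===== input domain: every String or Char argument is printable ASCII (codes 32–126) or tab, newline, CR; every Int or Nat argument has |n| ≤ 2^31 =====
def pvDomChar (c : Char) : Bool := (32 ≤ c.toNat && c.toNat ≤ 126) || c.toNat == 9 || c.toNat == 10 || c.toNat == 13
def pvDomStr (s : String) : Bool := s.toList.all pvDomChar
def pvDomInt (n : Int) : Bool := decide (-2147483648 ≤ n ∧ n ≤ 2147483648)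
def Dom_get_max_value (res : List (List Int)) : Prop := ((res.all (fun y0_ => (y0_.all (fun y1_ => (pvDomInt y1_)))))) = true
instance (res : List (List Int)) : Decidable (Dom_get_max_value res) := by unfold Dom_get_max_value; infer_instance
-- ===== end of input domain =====

-- B replaces A's nested rescan (two loops) by three staged linear passes: extract column 0,
-- max() of it, index() of that maximum; same return value on every input where A returns.

-- ===== PORT A =====
-- literal transliteration of A: max=0; k=0; for i in range(n): max=res[i][0]; for j in range(n): strict update
def get_max_value (res : List (List Int)) : Int × Int × Int :=
  let n := res.length
  let st := (List.range n).foldl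
    (fun (st : Int × Nat) i =>
      (List.range n).foldl
        (fun (st : Int × Nat) j =>
          if st.1 < (res.getD j []).getD 0 0 then ((res.getD j []).getD 0 0, j) else st)
        ((res.getD i []).getD 0 0, st.2))
    (0, 0)
  (st.1, (res.getD st.2 []).getD 1 0, (st.2 : Int))

-- ===== PORT B =====
-- literal transliteration of Source B: col = [row[0] for row in res]; m = max(col); k = col.index(m)
def get_max_value_alt (res : List (List Int)) : Int × Int × Int :=
  let col := res.map (fun row => row.getD 0 0)
  let m := (PySem.List.max? col (fun x => x)).getD 0
  let k := (PySem.List.index? col m).getD 0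
  (m, (res.getD k []).getD 1 0, (k : Int))

-- ===== PRECONDITION & SPEC =====
-- Pre_ = exactly where the Python A returns: res nonempty, every row nonempty (res[i][0] is read
-- for every i), and the row at the first index attaining the column-0 maximum has a second entry
-- (res[k][1] is read at the end).
def Pre_get_max_value (res : List (List Int)) : Prop :=
  res ≠ [] ∧ (∀ row ∈ res, row ≠ []) ∧
  (∀ i, i < res.length →
    ((∀ j, j < res.length → (res.getD j []).getD 0 0 ≤ (res.getD i []).getD 0 0) ∧
     (∀ j, j < i → (res.getD j []).getD 0 0 < (res.getD i []).getD 0 0)) →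
    2 ≤ (res.getD i []).length)
instance (res : List (List Int)) : Decidable (Pre_get_max_value res) := by
  unfold Pre_get_max_value; infer_instance

def pvWitness_get_max_value : List (List Int) := [[1, 2], [3, 4], [3, 5]]

def Spec_get_max_value (res : List (List Int)) (out : Int × Int × Int) : Prop := out = get_max_value_alt res
instance (res : List (List Int)) (out : Int × Int × Int) : Decidable (Spec_get_max_value res out) := by unfold Spec_get_max_value; infer_instance

-- ===== CLAIM (what is proved, stated in full; the proofs are below) =====
def Claim_equal_get_max_value : Prop := ∀ (res : List (List Int)), Dom_get_max_value res → Pre_get_max_value res → Spec_get_max_value res (get_max_value res)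

-- ===== LEMMAS AND PROOFS =====

-- column 0 of res
def pvVcol (res : List (List Int)) : List Int := res.map (fun r => r.getD 0 0)

-- the (value, index) maximum-scan step A's inner loop performs
def pvStep (st : Int × Nat) (p : Int × Nat) : Int × Nat :=
  if st.1 < p.1 then (p.1, p.2) else st

-- first index of M in vs (0 past the end)
def pvFirstIdx (M : Int) : List Int → Nat
  | [] => 0
  | x :: r => if x = M then 0 else pvFirstIdx M r + 1

-- the maximum of a nonempty vs
def pvMx (vs : List Int) : Int := vs.foldl max (vs.getD 0 0)

lemma pvVcol_getD (res : List (List Int)) (j : Nat) :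
    (res.getD j []).getD 0 0 = (pvVcol res).getD j 0 := by
  unfold pvVcol
  by_cases h : j < res.length
  · simp [List.getD, List.getElem?_map, List.getElem?_eq_getElem h]
  · simp [List.getD, List.getElem?_eq_none_iff.2 (by simpa using Nat.le_of_not_lt h)]

lemma pvFoldlMaxMax (t : List Int) (a b : Int) :
    t.foldl max (max a b) = max a (t.foldl max b) := by
  induction t generalizing a b with
  | nil => simp
  | cons c t ih =>
      simp only [List.foldl_cons]
      rw [max_assoc, ih]

lemma pvScanNoUpdate (l : List (Int × Nat)) (m0 : Int) (k0 : Nat)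
    (h : ∀ p ∈ l, p.1 ≤ m0) :
    l.foldl pvStep (m0, k0) = (m0, k0) := by
  induction l with
  | nil => rfl
  | cons p l ih =>
      have hp := h p (by simp)
      simp only [List.foldl_cons, pvStep, if_neg (not_lt.2 hp)]
      exact ih (fun q hq => h q (by simp [hq]))

lemma pvScanUpdate (vs : List Int) (off : Nat) (m0 : Int) (k0 : Nat)
    (h : ∃ x ∈ vs, m0 < x) :
    (vs.zipIdx off).foldl pvStep (m0, k0)
      = (vs.foldl max m0, off + pvFirstIdx (vs.foldl max m0) vs) := by
  induction vs generalizing off m0 k0 with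
  | nil => simp at h
  | cons x rest ih =>
      simp only [List.zipIdx_cons, List.foldl_cons, pvStep]
      by_cases hx : m0 < x
      · rw [if_pos hx]
        by_cases hr : ∃ y ∈ rest, x < y
        · rw [ih (off + 1) x off hr]
          have hM : rest.foldl max (max m0 x) = rest.foldl max x := by
            rw [max_eq_right (le_of_lt hx)]
          have hne : x ≠ rest.foldl max x := by
            obtain ⟨y, hy, hxy⟩ := hr
            have := (PySem.List.le_foldl_max rest x).2 y hy
            omega
          simp only [hM, pvFirstIdx, if_neg hne, Prod.mk.injEq]
          exact ⟨trivial, by omega⟩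
        · push Not at hr
          have hall : ∀ p ∈ rest.zipIdx (off + 1), p.1 ≤ x :=
            fun p hp => hr _ (List.fst_mem_of_mem_zipIdx hp)
          rw [pvScanNoUpdate _ _ _ hall]
          have hM : rest.foldl max (max m0 x) = x := by
            rw [max_eq_right (le_of_lt hx)]
            rcases PySem.List.foldl_max_mem rest x with h1 | h1
            · exact h1
            · exact le_antisymm (hr _ h1) ((PySem.List.le_foldl_max rest x).1)
          simp [hM, pvFirstIdx]
      · rw [if_neg hx]
        push Not at hx
        have hr : ∃ y ∈ rest, m0 < y := by
          obtain ⟨y, hy, hmy⟩ := h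
          rcases List.mem_cons.1 hy with rfl | hy'
          · omega
          · exact ⟨y, hy', hmy⟩
        rw [ih (off + 1) m0 k0 hr]
        have hM : rest.foldl max (max m0 x) = rest.foldl max m0 := by
          rw [max_eq_left hx]
        have hne : x ≠ rest.foldl max m0 := by
          obtain ⟨y, hy, hmy⟩ := hr
          have := (PySem.List.le_foldl_max rest m0).2 y hy
          omega
        simp only [hM, pvFirstIdx, if_neg hne, Prod.mk.injEq]
        exact ⟨trivial, by omega⟩

lemma pvMx_cons (h : Int) (t : List Int) : pvMx (h :: t) = t.foldl max h := by
  simp [pvMx]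

lemma pvMx_ge (vs : List Int) (x : Int) (hx : x ∈ vs) : x ≤ pvMx vs := by
  cases vs with
  | nil => simp at hx
  | cons h t =>
      rw [pvMx_cons]
      rcases List.mem_cons.1 hx with rfl | hx'
      · exact (PySem.List.le_foldl_max t x).1
      · exact (PySem.List.le_foldl_max t h).2 x hx'

lemma pvMx_mem (vs : List Int) (hne : vs ≠ []) : pvMx vs ∈ vs := by
  cases vs with
  | nil => exact absurd rfl hne
  | cons h t =>
      rw [pvMx_cons]
      rcases PySem.List.foldl_max_mem t h with h1 | h1
      · simp [h1]
      · simp [h1]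

lemma pvFoldlMax_eq_mx (vs : List Int) (hne : vs ≠ []) (m0 : Int) (hm : m0 < pvMx vs) :
    vs.foldl max m0 = pvMx vs := by
  cases vs with
  | nil => exact absurd rfl hne
  | cons h t =>
      rw [pvMx_cons] at hm ⊢
      have := pvFoldlMaxMax t m0 h
      simp only [List.foldl_cons, this]
      omega

lemma pvFirstIdx_head (h : Int) (t : List Int) (hh : h = pvMx (h :: t)) :
    pvFirstIdx (pvMx (h :: t)) (h :: t) = 0 := by
  simp [pvFirstIdx, ← hh]

-- one outer iteration of A: a full scan seeded with v keeps k exactly when v is already the max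
lemma pvInnerChar (vs : List Int) (hne : vs ≠ []) (v : Int) (hv : v ∈ vs) (k : Nat) :
    vs.zipIdx.foldl pvStep (v, k)
      = (pvMx vs, if v = pvMx vs then k else pvFirstIdx (pvMx vs) vs) := by
  by_cases hv' : v = pvMx vs
  · rw [if_pos hv']
    have hle : ∀ p ∈ vs.zipIdx, p.1 ≤ v := by
      intro p hp
      simpa [hv'] using pvMx_ge vs p.1 (List.fst_mem_of_mem_zipIdx hp)
    rw [pvScanNoUpdate _ _ _ hle, hv']
  · rw [if_neg hv']
    have hlt : v < pvMx vs := lt_of_le_of_ne (pvMx_ge vs v hv) hv'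
    have hex : ∃ x ∈ vs, v < x := ⟨pvMx vs, pvMx_mem vs hne, hlt⟩
    rw [pvScanUpdate vs 0 v k hex, pvFoldlMax_eq_mx vs hne v hlt]
    simp

lemma pvGetD_mem (vs : List Int) (i : Nat) (hi : i < vs.length) : vs.getD i 0 ∈ vs := by
  rw [List.getD_eq_getElem vs 0 hi]
  exact List.getElem_mem hi

-- bridge: A's index-driven inner loop is the pair scan over vs.zipIdx
lemma pvRangeFold (vs : List Int) (init : Int × Nat) :
    (List.range vs.length).foldl
        (fun st j => if st.1 < vs.getD j 0 then (vs.getD j 0, j) else st) init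
      = vs.zipIdx.foldl pvStep init := by
  induction vs using List.reverseRecOn generalizing init with
  | nil => simp
  | append_singleton t x ih =>
      rw [List.length_append, List.length_singleton, List.range_succ, List.foldl_append,
        List.zipIdx_append, List.foldl_append]
      have hcongr :
          (List.range t.length).foldl
              (fun st j => if st.1 < (t ++ [x]).getD j 0 then ((t ++ [x]).getD j 0, j) else st) init
            = (List.range t.length).foldl
              (fun st j => if st.1 < t.getD j 0 then (t.getD j 0, j) else st) init := by
        apply PySem.List.foldl_congr_mem
        intro acc j hj
        rw [List.getD_append _ _ _ _ (List.mem_range.1 hj)]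
      rw [hcongr, ih]
      simp [pvStep, List.getD]

-- A's outer loop: m ≥ 1 full scans end at (max, first argmax unless every seed was the max)
lemma pvOuterChar (vs : List Int) (m : Nat) (hm : 1 ≤ m) (hmn : m ≤ vs.length)
    (st0 : Int × Nat) :
    (List.range m).foldl (fun st i => vs.zipIdx.foldl pvStep (vs.getD i 0, st.2)) st0
      = (pvMx vs,
         if ∀ i, i < m → vs.getD i 0 = pvMx vs then st0.2 else pvFirstIdx (pvMx vs) vs) := by
  have hne : vs ≠ [] := by
    intro h
    rw [h, List.length_nil] at hmn
    omega
  induction m generalizing st0 with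
  | zero => omega
  | succ m ih =>
      by_cases hm0 : m = 0
      · subst hm0
        have h0 : (0 : Nat) < vs.length := by omega
        have hr1 : (0 : Nat) + 1 = 1 := rfl
        rw [hr1]
        simp only [List.range_one, List.foldl_cons, List.foldl_nil]
        rw [pvInnerChar vs hne _ (pvGetD_mem vs 0 h0) st0.2]
        by_cases hc : vs.getD 0 0 = pvMx vs
        · rw [if_pos hc, if_pos (by intro i hi; interval_cases i; exact hc)]
        · rw [if_neg hc, if_neg (by intro hall; exact hc (hall 0 (by omega)))]
      · have hm1 : 1 ≤ m := by omega
        have hmn' : m ≤ vs.length := by omega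
        rw [List.range_succ, List.foldl_append, ih hm1 hmn' st0, List.foldl_cons, List.foldl_nil]
        have hmem : vs.getD m 0 ∈ vs := pvGetD_mem vs m (by omega)
        rw [pvInnerChar vs hne _ hmem]
        by_cases hc : vs.getD m 0 = pvMx vs
        · rw [if_pos hc]
          by_cases hall : ∀ i, i < m → vs.getD i 0 = pvMx vs
          · rw [if_pos hall, if_pos (by
              intro i hi
              by_cases h : i < m
              · exact hall i h
              · have hieq : i = m := by omega
                rw [hieq]; exact hc)]
          · rw [if_neg hall, if_neg (by
              intro hall'; exact hall (fun i hi => hall' i (by omega)))]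
        · rw [if_neg hc, if_neg (by
            intro hall'; exact hc (hall' m (by omega)))]

-- A's whole loop nest over vs, from the Python initial state (0, 0)
lemma pvOuterFull (vs : List Int) (hne : vs ≠ []) :
    (List.range vs.length).foldl
        (fun (st : Int × Nat) i => vs.zipIdx.foldl pvStep (vs.getD i 0, st.2)) (0, 0)
      = (pvMx vs, pvFirstIdx (pvMx vs) vs) := by
  have hlen : 1 ≤ vs.length := by
    cases vs with
    | nil => exact absurd rfl hne
    | cons h t => simp
  rw [pvOuterChar vs vs.length hlen (le_refl _) (0, 0)]
  by_cases hall : ∀ i, i < vs.length → vs.getD i 0 = pvMx vs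
  · rw [if_pos hall]
    cases vs with
    | nil => exact absurd rfl hne
    | cons h t =>
        have hh : h = pvMx (h :: t) := by
          have := hall 0 (by simp)
          rwa [List.getD_cons_zero] at this
        rw [pvFirstIdx_head h t hh]
  · rw [if_neg hall]

-- A's loop nest on res equals the canonical (max, first argmax) of column 0
lemma pvA_char (res : List (List Int)) (hne : res ≠ []) :
    (List.range res.length).foldl
        (fun (st : Int × Nat) i =>
          (List.range res.length).foldl
            (fun (st : Int × Nat) j =>
              if st.1 < (res.getD j []).getD 0 0 then ((res.getD j []).getD 0 0, j) else st)
            ((res.getD i []).getD 0 0, st.2))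
        (0, 0)
      = (pvMx (pvVcol res), pvFirstIdx (pvMx (pvVcol res)) (pvVcol res)) := by
  have hvslen : res.length = (pvVcol res).length := by simp [pvVcol]
  have hvsne : pvVcol res ≠ [] := by
    simp [pvVcol, hne]
  rw [hvslen]
  have h1 :
      (List.range (pvVcol res).length).foldl
          (fun (st : Int × Nat) i =>
            (List.range (pvVcol res).length).foldl
              (fun (st : Int × Nat) j =>
                if st.1 < (res.getD j []).getD 0 0 then ((res.getD j []).getD 0 0, j) else st)
              ((res.getD i []).getD 0 0, st.2))
          (0, 0)
        = (List.range (pvVcol res).length).foldl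
            (fun (st : Int × Nat) i =>
              (pvVcol res).zipIdx.foldl pvStep ((pvVcol res).getD i 0, st.2)) (0, 0) := by
    apply PySem.List.foldl_congr_mem
    intro acc i _
    rw [pvVcol_getD res i, ← pvRangeFold (pvVcol res) ((pvVcol res).getD i 0, acc.2)]
    apply PySem.List.foldl_congr_mem
    intro acc' j _
    rw [pvVcol_getD res j]
  rw [h1, pvOuterFull (pvVcol res) hvsne]

-- B-side: max(col) of a nonempty list is pvMx
lemma pvMax?_id (vs : List Int) (hne : vs ≠ []) :
    PySem.List.max? vs (fun x => x) = some (pvMx vs) := by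
  cases vs with
  | nil => exact absurd rfl hne
  | cons h t => rw [PySem.List.max?_id_cons, pvMx_cons]

-- B-side: col.index(v) for v ∈ col is pvFirstIdx
lemma pvIndex?_firstIdx (vs : List Int) (v : Int) (hv : v ∈ vs) :
    PySem.List.index? vs v = some (pvFirstIdx v vs) := by
  induction vs with
  | nil => simp at hv
  | cons x t ih =>
      by_cases hx : x = v
      · subst hx
        rw [PySem.List.index?_cons_self]
        simp [pvFirstIdx]
      · have hvt : v ∈ t := by
          rcases List.mem_cons.1 hv with rfl | h
          · exact absurd rfl hx
          · exact h
        rw [PySem.List.index?_cons_of_ne t hx, ih hvt]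
        simp only [Option.map_some, pvFirstIdx, if_neg hx]

-- B's staged passes on res produce the same canonical pair
lemma pvB_char (res : List (List Int)) (hne : res ≠ []) :
    get_max_value_alt res
      = (pvMx (pvVcol res),
         (res.getD (pvFirstIdx (pvMx (pvVcol res)) (pvVcol res)) []).getD 1 0,
         (pvFirstIdx (pvMx (pvVcol res)) (pvVcol res) : Int)) := by
  have hvsne : pvVcol res ≠ [] := by simp [pvVcol, hne]
  have h1 : PySem.List.max? (res.map (fun row => row.getD 0 0)) (fun x => x)
      = some (pvMx (pvVcol res)) := pvMax?_id (pvVcol res) hvsne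
  have h2 : PySem.List.index? (res.map (fun row => row.getD 0 0)) (pvMx (pvVcol res))
      = some (pvFirstIdx (pvMx (pvVcol res)) (pvVcol res)) :=
    pvIndex?_firstIdx (pvVcol res) (pvMx (pvVcol res)) (pvMx_mem (pvVcol res) hvsne)
  simp only [get_max_value_alt, h1, h2, Option.getD_some]

-- ===== VERDICT (by name: the statement is the Claim_ definition above) =====
theorem get_max_value_spec : Claim_equal_get_max_value := by
  intro res _ hpre
  obtain ⟨hne, -, -⟩ := hpre
  unfold Spec_get_max_value get_max_value
  rw [pvB_char res hne]
  simp only [pvA_char res hne]
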